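-- pv_equiv track=rewrite | github.com/brightworks-tm/VanaMacro | model.py | _six_lines
-- ===== SOURCE A (Python) =====
-- from typing import List, Literal, Optional, Dict, Any
--
-- def _six_lines(lines: Optional[List[str]]) -> List[str]:
--     """Return exactly six lines, padding/truncating as needed."""
--     base = ["", "", "", "", "", ""]
--     if not lines:
--         return list(base)
--     normalized: List[str] = []
--     for i in range(6):
--         if i < len(lines) and lines[i] is not None:
--             normalized.append(str(lines[i]).replace("\r\n", "\n").replace("\r", "\n"))
--         else:
--             normalized.append("")
--     return normalized
-- ===== SOURCE B (Python) =====
-- def _six_lines(lines):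
--     """Return exactly six lines, padding/truncating as needed."""
--     return _take_pad(lines or [], 6)
--
--
-- def _take_pad(xs, k):
--     """Recursively peel up to k items off xs, normalizing each; the base
--     case emits the remaining blank lines as one block."""
--     if k == 0:
--         return []
--     if not xs:
--         return [""] * k
--     head = xs[0]
--     val = "" if head is None else str(head).replace("\r\n", "\n").replace("\r", "\n")
--     return [val] + _take_pad(xs[1:], k - 1)
-- ===== Notes on version B (the rewrite author's own statement) =====
-- stated objective: alternative
-- what changed: B replaces A's fixed range(6) index loop with a guard per position by structural recursion on the list with a fuel counter: each step peels and normalizes the head, and the base case emits the remaining blank lines as a single block, so there is no indexing and no per-position padding test.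
import Mathlib
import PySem

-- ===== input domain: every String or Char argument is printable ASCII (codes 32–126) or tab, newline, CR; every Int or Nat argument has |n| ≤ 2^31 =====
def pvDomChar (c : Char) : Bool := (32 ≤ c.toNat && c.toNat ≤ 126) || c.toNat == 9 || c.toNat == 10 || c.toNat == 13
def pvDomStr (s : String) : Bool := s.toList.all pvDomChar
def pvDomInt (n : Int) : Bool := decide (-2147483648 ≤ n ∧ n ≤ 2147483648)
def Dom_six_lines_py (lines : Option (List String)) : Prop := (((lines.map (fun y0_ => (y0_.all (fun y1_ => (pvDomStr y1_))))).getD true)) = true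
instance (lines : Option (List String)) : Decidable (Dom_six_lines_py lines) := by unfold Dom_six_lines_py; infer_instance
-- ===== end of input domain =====

-- B replaces A's fixed range(6) index loop by structural recursion on the list with a
-- fuel counter whose base case emits the remaining blank lines as one block
-- (objective: alternative decomposition, same cost).

-- ===== PORT A =====
-- literal port of A's fixed range(6) loop; 'lines[i] is not None' is always true for
-- List String elements (an Option never occurs here), so that conjunct is identically true
def six_lines_py (lines : Option (List String)) : List String :=
  let base := ["", "", "", "", "", ""]
  match lines with
  | none => base
  | some ls =>
    if ls = [] then base
    else
      (PySem.List.pyRange 0 6 1).foldl (fun normalized i =>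
        if i < (ls.length : Int) then
          normalized ++ [PySem.Str.replace (PySem.Str.replace (PySem.List.pyGetD ls i "") "\r\n" "\n") "\r" "\n"]
        else
          normalized ++ [""]) []

-- ===== PORT B =====
-- recursive peel with fuel, as in Source B's _take_pad
def takePad (xs : List String) (k : Nat) : List String :=
  match k, xs with
  | 0, _ => []
  | k + 1, [] => List.replicate (k + 1) ""
  | k + 1, x :: rest =>
      (PySem.Str.replace (PySem.Str.replace x "\r\n" "\n") "\r" "\n") :: takePad rest k

def six_lines_py_alt (lines : Option (List String)) : List String :=
  takePad (lines.getD []) 6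

-- ===== PRECONDITION & SPEC =====
def Spec_six_lines_py (lines : Option (List String)) (out : List String) : Prop := out = six_lines_py_alt lines
instance (lines : Option (List String)) (out : List String) : Decidable (Spec_six_lines_py lines out) := by unfold Spec_six_lines_py; infer_instance

-- ===== CLAIM (what is proved, stated in full; the proofs are below) =====
def Claim_equal_six_lines_py : Prop := ∀ (lines : Option (List String)), Dom_six_lines_py lines → Spec_six_lines_py lines (six_lines_py lines)

-- ===== LEMMAS AND PROOFS =====

-- A's loop over range(n): first min n len mapped elements, then blanks up to n
theorem foldA (ls : List String) (g : String → String) (n : Nat) :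
    (PySem.List.pyRange 0 (n : Int) 1).foldl (fun normalized i =>
        if i < (ls.length : Int) then
          normalized ++ [g (PySem.List.pyGetD ls i "")]
        else
          normalized ++ [""]) []
      = (ls.take n).map g ++ List.replicate (n - (ls.take n).length) "" := by
  induction n with
  | zero => simp [PySem.List.pyRange_one_eq_nil]
  | succ n ih =>
    have hsplit : PySem.List.pyRange 0 ((n : Int) + 1) 1
        = PySem.List.pyRange 0 (n : Int) 1 ++ [(n : Int)] := by
      simpa using PySem.List.pyRange_one_succ_right (a := 0) (b := (n : Int)) (by positivity)
    push_cast
    rw [hsplit, List.foldl_append, ih]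
    by_cases h : n < ls.length
    · have hc : ((n : Int) < (ls.length : Int)) := by exact_mod_cast h
      simp only [List.foldl, if_pos hc, PySem.List.pyGetD_natCast]
      have ht : List.take (n + 1) ls = List.take n ls ++ [ls[n]] := by
        rw [List.take_add_one, List.getElem?_eq_getElem h]; rfl
      have hg : ls.getD n "" = ls[n] := List.getD_eq_getElem ls "" h
      rw [ht, hg, List.map_append, List.length_take, Nat.min_eq_left (Nat.le_of_lt h),
        Nat.sub_self, List.replicate_zero, List.append_nil, List.length_append,
        List.length_take, Nat.min_eq_left (Nat.le_of_lt h)]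
      simp
    · have hc : ¬ ((n : Int) < (ls.length : Int)) := by exact_mod_cast h
      have hlen : ls.length ≤ n := Nat.le_of_not_lt h
      simp only [List.foldl, if_neg hc]
      rw [List.take_of_length_le hlen, List.take_of_length_le (Nat.le_succ_of_le hlen)]
      rw [List.append_assoc, ← List.replicate_succ' (n := n - ls.length)]
      have : n + 1 - ls.length = (n - ls.length) + 1 := by omega
      rw [this]

-- B's recursion computes the same take-map-pad shape
theorem takePad_eq (k : Nat) (xs : List String) :
    takePad xs k
      = (xs.take k).map (fun x => PySem.Str.replace (PySem.Str.replace x "\r\n" "\n") "\r" "\n")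
        ++ List.replicate (k - (xs.take k).length) "" := by
  induction k generalizing xs with
  | zero => simp [takePad]
  | succ k ih =>
    cases xs with
    | nil => simp [takePad]
    | cons x rest =>
      simp [takePad, ih rest]

-- ===== VERDICT (by name: the statement is the Claim_ definition above) =====
theorem six_lines_py_spec : Claim_equal_six_lines_py := by
  intro lines _
  unfold Spec_six_lines_py six_lines_py six_lines_py_alt
  cases lines with
  | none => simp [takePad_eq]
  | some ls =>
    rcases eq_or_ne ls [] with rfl | hne
    · simp [takePad_eq]
    · have h6 : (6 : Int) = ((6 : Nat) : Int) := by norm_num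
      simp only [if_neg hne, Option.getD_some, h6,
        foldA ls (fun x => PySem.Str.replace (PySem.Str.replace x "\r\n" "\n") "\r" "\n") 6,
        takePad_eq]
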